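-- pv_equiv track=rewrite | github.com/AmberrTan/CV1014 | scripts/osm_import.py | _infer_facilities
-- ===== SOURCE A (Python) =====
-- def _infer_facilities(name: str, tags: dict[str, str], gym_type: str) -> list[str]:
--     """Infer a facility list from tags and gym type."""
--     haystack = f"{name.lower()} {tags.get('sport', '').lower()}"
--     facilities = {"cardio", "free weights", "machine weights"}
--     if tags.get("shower") == "yes":
--         facilities.add("shower")
--     if tags.get("toilets") == "yes":
--         facilities.add("toilets")
--     if tags.get("sauna") == "yes":
--         facilities.add("sauna")
--     if tags.get("wheelchair") == "yes":
--         facilities.add("accessible")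
--     if gym_type in {"boutique", "group training", "martial arts", "women-only"}:
--         facilities.add("group classes")
--     if gym_type in {"commercial", "group training", "boutique"}:
--         facilities.add("personal training")
--     if any(keyword in haystack for keyword in ["pilates", "yoga", "barre"]):
--         facilities.add("studio")
--     if any(keyword in haystack for keyword in ["boxing", "muay", "taekwondo", "mma"]):
--         facilities.add("combat training")
--     return sorted(facilities)
-- ===== SOURCE B (Python) =====
-- # All facilities this function can ever return, pre-sorted; the output is built
-- # in order by scanning this list with a per-facility predicate -- no sort needed.
-- _ALL_FACILITIES = ["accessible", "cardio", "combat training", "free weights",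
--                    "group classes", "machine weights", "personal training",
--                    "sauna", "shower", "studio", "toilets"]
--
--
-- def _infer_facilities(name: str, tags: dict[str, str], gym_type: str) -> list[str]:
--     """Infer a facility list: filter the sorted universe with a predicate."""
--     haystack = f"{name.lower()} {tags.get('sport', '').lower()}"
--
--     def present(fac: str) -> bool:
--         if fac == "cardio" or fac == "free weights" or fac == "machine weights":
--             return True
--         if fac == "shower" or fac == "toilets" or fac == "sauna":
--             return tags.get(fac) == "yes"
--         if fac == "accessible":
--             return tags.get("wheelchair") == "yes"
--         if fac == "group classes":
--             return gym_type in ("boutique", "group training", "martial arts", "women-only")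
--         if fac == "personal training":
--             return gym_type in ("commercial", "group training", "boutique")
--         if fac == "studio":
--             return any(k in haystack for k in ("pilates", "yoga", "barre"))
--         if fac == "combat training":
--             return any(k in haystack for k in ("boxing", "muay", "taekwondo", "mma"))
--         return False
--
--     return [fac for fac in _ALL_FACILITIES if present(fac)]
-- ===== Notes on version B (the rewrite author's own statement) =====
-- stated objective: alternative
-- what changed: Instead of accumulating facilities into a set and sorting it, B removes the sort entirely: it scans a pre-sorted constant universe of all eleven possible facilities and keeps each one whose per-facility predicate (flag tag, gym-type membership, or keyword-in-haystack) holds, emitting the result directly in order.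
import Mathlib
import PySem

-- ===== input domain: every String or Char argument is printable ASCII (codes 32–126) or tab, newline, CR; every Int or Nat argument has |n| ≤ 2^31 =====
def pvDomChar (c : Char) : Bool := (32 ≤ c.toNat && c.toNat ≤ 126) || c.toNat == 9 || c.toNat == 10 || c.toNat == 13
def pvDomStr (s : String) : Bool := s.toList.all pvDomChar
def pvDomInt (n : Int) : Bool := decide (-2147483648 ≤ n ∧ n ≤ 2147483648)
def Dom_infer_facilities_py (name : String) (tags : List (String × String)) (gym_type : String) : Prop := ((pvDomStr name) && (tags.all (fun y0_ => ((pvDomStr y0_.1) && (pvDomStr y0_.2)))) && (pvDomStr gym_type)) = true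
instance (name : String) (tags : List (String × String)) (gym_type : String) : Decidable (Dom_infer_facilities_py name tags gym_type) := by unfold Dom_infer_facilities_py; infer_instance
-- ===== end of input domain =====

-- B removes the collect-then-sort shape: it filters a pre-sorted constant universe of
-- all possible facilities with a per-facility predicate, emitting the output in order.


-- ===== PORT A =====
-- literal transliteration of _infer_facilities: haystack, base set, eight ifs adding
-- to the set, sorted(…) at the end.  haystack is kept as List Char (f-string = code-point concat).
def infer_facilities_py (name : String) (tags : List (String × String)) (gym_type : String) : List String :=
  let d := PySem.Dict.ofList tags
  let haystack : List Char :=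
    PySem.Chars.lower name.toList ++ ' ' :: PySem.Chars.lower (PySem.Dict.getD d "sport" "").toList
  let facilities : PySem.Set String := PySem.Set.ofList ["cardio", "free weights", "machine weights"]
  let facilities := if PySem.Dict.get? d "shower" == some "yes" then PySem.Set.add facilities "shower" else facilities
  let facilities := if PySem.Dict.get? d "toilets" == some "yes" then PySem.Set.add facilities "toilets" else facilities
  let facilities := if PySem.Dict.get? d "sauna" == some "yes" then PySem.Set.add facilities "sauna" else facilities
  let facilities := if PySem.Dict.get? d "wheelchair" == some "yes" then PySem.Set.add facilities "accessible" else facilities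
  let facilities := if PySem.Set.contains (PySem.Set.ofList ["boutique", "group training", "martial arts", "women-only"]) gym_type then PySem.Set.add facilities "group classes" else facilities
  let facilities := if PySem.Set.contains (PySem.Set.ofList ["commercial", "group training", "boutique"]) gym_type then PySem.Set.add facilities "personal training" else facilities
  let facilities := if (["pilates", "yoga", "barre"] : List String).any (fun keyword => PySem.Chars.isIn keyword.toList haystack) then PySem.Set.add facilities "studio" else facilities
  let facilities := if (["boxing", "muay", "taekwondo", "mma"] : List String).any (fun keyword => PySem.Chars.isIn keyword.toList haystack) then PySem.Set.add facilities "combat training" else facilities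
  PySem.List.sorted facilities (fun x => x) false

-- ===== PORT B =====
-- the pre-sorted universe of all facilities B can ever emit (module constant in Source B)
def pvAllFacilities : List String :=
  ["accessible", "cardio", "combat training", "free weights", "group classes",
   "machine weights", "personal training", "sauna", "shower", "studio", "toilets"]

-- literal transliteration of Source B: haystack, the local predicate `present` as an
-- if-chain over the facility name, then the list comprehension = filter; no sort.
def infer_facilities_py_alt (name : String) (tags : List (String × String)) (gym_type : String) : List String :=
  let d := PySem.Dict.ofList tags
  let haystack : List Char :=
    PySem.Chars.lower name.toList ++ ' ' :: PySem.Chars.lower (PySem.Dict.getD d "sport" "").toList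
  let present : String → Bool := fun fac =>
    if fac == "cardio" || fac == "free weights" || fac == "machine weights" then true
    else if fac == "shower" || fac == "toilets" || fac == "sauna" then
      PySem.Dict.get? d fac == some "yes"
    else if fac == "accessible" then PySem.Dict.get? d "wheelchair" == some "yes"
    else if fac == "group classes" then
      (["boutique", "group training", "martial arts", "women-only"] : List String).contains gym_type
    else if fac == "personal training" then
      (["commercial", "group training", "boutique"] : List String).contains gym_type
    else if fac == "studio" then
      (["pilates", "yoga", "barre"] : List String).any (fun k => PySem.Chars.isIn k.toList haystack)
    else if fac == "combat training" then
      (["boxing", "muay", "taekwondo", "mma"] : List String).any (fun k => PySem.Chars.isIn k.toList haystack)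
    else false
  pvAllFacilities.filter present

-- ===== PRECONDITION & SPEC =====
def Spec_infer_facilities_py (name : String) (tags : List (String × String)) (gym_type : String) (out : List String) : Prop := out = infer_facilities_py_alt name tags gym_type
instance (name : String) (tags : List (String × String)) (gym_type : String) (out : List String) : Decidable (Spec_infer_facilities_py name tags gym_type out) := by unfold Spec_infer_facilities_py; infer_instance

-- ===== CLAIM (what is proved, stated in full; the proofs are below) =====
def Claim_equal_infer_facilities_py : Prop := ∀ (name : String) (tags : List (String × String)) (gym_type : String), Dom_infer_facilities_py name tags gym_type → Spec_infer_facilities_py name tags gym_type (infer_facilities_py name tags gym_type)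

-- ===== LEMMAS AND PROOFS =====

-- the universe list is strictly increasing (proved over toList, where < is decidable)
theorem pvAll_pairwise : pvAllFacilities.Pairwise (fun a b => a < b) := by
  have h : pvAllFacilities.Pairwise (fun a b => a.toList < b.toList) := by decide
  exact h.imp (fun hab => String.lt_iff_toList_lt.mpr hab)

-- ===== VERDICT (by name: the statement is the Claim_ definition above) =====
theorem infer_facilities_py_spec : Claim_equal_infer_facilities_py := by
  intro name tags gym_type _
  unfold Spec_infer_facilities_py infer_facilities_py infer_facilities_py_alt
  dsimp only
  apply PySem.List.sorted_eq_of_perm_of_pairwise_lt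
  · -- the filtered universe is a permutation of A's accumulated set: 2^8 boolean cases
    simp only [pvAllFacilities, List.filter_cons, List.filter_nil,
      show PySem.Set.ofList ["boutique", "group training", "martial arts", "women-only"] = ["boutique", "group training", "martial arts", "women-only"] from by decide,
      show PySem.Set.ofList ["commercial", "group training", "boutique"] = ["commercial", "group training", "boutique"] from by decide,
      PySem.Set.contains_eq_listContains,
      String.reduceBEq, Bool.or_false, Bool.or_true,
      Bool.false_eq_true, if_true, if_false]
    generalize (PySem.Dict.get? (PySem.Dict.ofList tags) "shower" == some "yes") = c1
    generalize (PySem.Dict.get? (PySem.Dict.ofList tags) "toilets" == some "yes") = c2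
    generalize (PySem.Dict.get? (PySem.Dict.ofList tags) "sauna" == some "yes") = c3
    generalize (PySem.Dict.get? (PySem.Dict.ofList tags) "wheelchair" == some "yes") = c4
    generalize ((["boutique", "group training", "martial arts", "women-only"] : List String).contains gym_type) = c5
    generalize ((["commercial", "group training", "boutique"] : List String).contains gym_type) = c6
    generalize ((["pilates", "yoga", "barre"] : List String).any (fun keyword => PySem.Chars.isIn keyword.toList (PySem.Chars.lower name.toList ++ ' ' :: PySem.Chars.lower (PySem.Dict.getD (PySem.Dict.ofList tags) "sport" "").toList))) = c7
    generalize ((["boxing", "muay", "taekwondo", "mma"] : List String).any (fun keyword => PySem.Chars.isIn keyword.toList (PySem.Chars.lower name.toList ++ ' ' :: PySem.Chars.lower (PySem.Dict.getD (PySem.Dict.ofList tags) "sport" "").toList))) = c8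
    revert c1 c2 c3 c4 c5 c6 c7 c8
    decide
  · -- a filter of a strictly increasing list is strictly increasing
    exact pvAll_pairwise.sublist List.filter_sublist
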